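-- pv_equiv track=rewrite | github.com/harshitshiroiya/assigner-python | assigner/assign.py | successors
-- ===== SOURCE A (Python) =====
-- def create_group(a,Studentlist):
--     listOfGroups = [y.copy() for y in a]
--     for members in Studentlist:
--         existing_student = False
--         for groups in listOfGroups:
--             if members in groups:
--                 existing_student = True
--                 break # not considering the student if already in a group
--         if existing_student:
--             continue
--         else:
--             listOfGroups.append([members])
--             break
--     return listOfGroups
--
-- def possible_team_members(groupList,Studentlist):
--
--     possible_team = groupList[len(groupList)-1]
--     final_groups = []
--     for group in groupList:
--         for student in group:
--             final_groups.append(student)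
--
--     two_members= []
--     for student in Studentlist:
--         if student not in final_groups:
--             team = [possible_team[0], student]
--             if(sorted(team) not in two_members):
--                 two_members.append(sorted(team))
--
--     three_members = []
--     for groups in two_members:
--         for student in Studentlist:
--             if student not in final_groups and student not in groups:
--                 team = [groups[0],groups[1], student]
--                 if(sorted(team) not in three_members):
--                     three_members.append(sorted(team))
--
--     for groups in two_members:
--         groupList.append(groups)
--
--     for groups in three_members:
--         groupList.append(groups)
--
--     return groupList
--
-- def successors(a,Studentlist):
--     succ_list = []
--     grouplist = create_group(a,Studentlist)
--     possible_groups = possible_team_members(grouplist,Studentlist)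
--     for finalgroup in possible_groups:
--         tempGroup = [i.copy() for i in a]
--         if finalgroup not in a:
--             tempGroup.append(finalgroup)
--             succ_list.append(tempGroup)
--     return succ_list
-- ===== SOURCE B (Python) =====
-- def _triples(first, rest):
--     if not rest:
--         return []
--     x, tail = rest[0], rest[1:]
--     return [sorted([first, x, y]) for y in tail] + _triples(first, tail)
--
-- def successors(a, Studentlist):
--     grouped = set()
--     for g in a:
--         grouped.update(g)
--     ungrouped = []
--     for s in Studentlist:
--         if s not in grouped:
--             grouped.add(s)
--             ungrouped.append(s)
--     if not ungrouped:
--         return []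
--     first, rest = ungrouped[0], ungrouped[1:]
--     teams = [[first]] + [sorted([first, s]) for s in rest] + _triples(first, rest)
--     return [a + [t] for t in teams]
-- ===== Notes on version B (the rewrite author's own statement) =====
-- stated objective: faster
-- what changed: Collapses A's three helpers (create_group / possible_team_members / filter loop) into one pass: a set-based dedup builds the ungrouped-student list once, then the singleton, the pairs and the triples are enumerated directly in suffix order, distinct by construction, so all of A's repeated 'not in final_groups / two_members / three_members / a' list scans disappear.
import Mathlib
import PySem

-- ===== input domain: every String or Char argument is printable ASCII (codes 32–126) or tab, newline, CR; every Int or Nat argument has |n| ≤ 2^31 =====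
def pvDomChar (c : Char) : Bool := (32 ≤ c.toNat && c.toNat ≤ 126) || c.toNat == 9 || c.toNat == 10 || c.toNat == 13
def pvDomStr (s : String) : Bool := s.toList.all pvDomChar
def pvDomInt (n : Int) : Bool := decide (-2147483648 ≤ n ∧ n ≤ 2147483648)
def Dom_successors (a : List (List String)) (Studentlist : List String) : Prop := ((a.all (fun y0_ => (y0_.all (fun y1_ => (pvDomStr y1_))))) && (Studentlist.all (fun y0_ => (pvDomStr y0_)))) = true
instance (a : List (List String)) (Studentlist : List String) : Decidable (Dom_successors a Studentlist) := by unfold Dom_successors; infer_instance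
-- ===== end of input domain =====

-- B collapses A's three helper passes into one dedup pass plus direct enumeration of the
-- singleton / pair / triple teams (distinct by construction, so A's repeated list-membership
-- rescans disappear); measured faster. Equivalence is on return values (A mutates no argument).

-- ===== PORT A =====
-- create_group: listOfGroups stays a copy of a until the first ungrouped student is appended (break)
def pvCreateGroup (a : List (List String)) : List String → List (List String)
  | [] => a
  | m :: rest =>
    if a.any (fun g => g.contains m) then pvCreateGroup a rest
    else a ++ [[m]]

-- possible_team_members; groupList[len-1] / possible_team[0] / groups[0] / groups[1] are ported with
-- pyGet? (none = IndexError) defaulted — under Pre_ every such access is in range where Python reaches it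
def pvPTM (groupList : List (List String)) (Studentlist : List String) : List (List String) :=
  let possible_team := (PySem.List.pyGet? groupList ((groupList.length : Int) - 1)).getD []
  let final_groups := groupList.foldl (fun acc g => g.foldl (fun acc2 s => acc2 ++ [s]) acc) []
  let two_members := Studentlist.foldl (fun acc s =>
    if final_groups.contains s then acc
    else
      if acc.contains (PySem.List.sorted [(PySem.List.pyGet? possible_team 0).getD "", s] (fun x => x) false) then acc
      else acc ++ [PySem.List.sorted [(PySem.List.pyGet? possible_team 0).getD "", s] (fun x => x) false]) []
  let three_members := two_members.foldl (fun acc3 g =>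
    Studentlist.foldl (fun acc s =>
      if final_groups.contains s || g.contains s then acc
      else
        if acc.contains (PySem.List.sorted [(PySem.List.pyGet? g 0).getD "", (PySem.List.pyGet? g 1).getD "", s] (fun x => x) false) then acc
        else acc ++ [PySem.List.sorted [(PySem.List.pyGet? g 0).getD "", (PySem.List.pyGet? g 1).getD "", s] (fun x => x) false]) acc3) []
  groupList ++ two_members ++ three_members

def successors (a : List (List String)) (Studentlist : List String) : List (List (List String)) :=
  let grouplist := pvCreateGroup a Studentlist
  let possible_groups := pvPTM grouplist Studentlist
  possible_groups.foldl (fun acc g => if a.contains g then acc else acc ++ [a ++ [g]]) []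

-- ===== PORT B =====
-- _triples(first, rest): all sorted 3-subsets through first, in suffix order
def pvTriples (first : String) : List String → List (List String)
  | [] => []
  | x :: tail =>
      tail.map (fun y => PySem.List.sorted [first, x, y] (fun z => z) false) ++ pvTriples first tail

def successors_alt (a : List (List String)) (Studentlist : List String) : List (List (List String)) :=
  let grouped := a.foldl (fun s g => PySem.Set.update s g) PySem.Set.empty
  let res := Studentlist.foldl (fun (p : PySem.Set String × List String) s =>
      if PySem.Set.contains p.1 s then p else (PySem.Set.add p.1 s, p.2 ++ [s])) (grouped, [])
  match res.2 with
  | [] => []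
  | first :: rest =>
      ([[first]] ++ rest.map (fun s => PySem.List.sorted [first, s] (fun x => x) false)
        ++ pvTriples first rest).map (fun t => a ++ [t])

-- ===== PRECONDITION & SPEC =====
-- Pre_ excludes exactly a = [] ∧ Studentlist = [], where A's grouplist[-1] raises IndexError
def Pre_successors (a : List (List String)) (Studentlist : List String) : Prop :=
  ¬ (a = [] ∧ Studentlist = [])
instance (a : List (List String)) (Studentlist : List String) : Decidable (Pre_successors a Studentlist) := by unfold Pre_successors; infer_instance
def pvWitness_successors : List (List String) × List String := ([["ann"]], ["bob"])

def Spec_successors (a : List (List String)) (Studentlist : List String) (out : List (List (List String))) : Prop := out = successors_alt a Studentlist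
instance (a : List (List String)) (Studentlist : List String) (out : List (List (List String))) : Decidable (Spec_successors a Studentlist out) := by unfold Spec_successors; infer_instance

-- ===== CLAIM (what is proved, stated in full; the proofs are below) =====
def Claim_equal_successors : Prop := ∀ (a : List (List String)) (Studentlist : List String), Dom_successors a Studentlist → Pre_successors a Studentlist → Spec_successors a Studentlist (successors a Studentlist)

-- ===== LEMMAS AND PROOFS =====

-- first-occurrence dedup of a list against a seen-list (order-insensitive in `seen`)
def pvDed (seen : List String) : List String → List String
  | [] => []
  | x :: xs => if x ∈ seen then pvDed seen xs else x :: pvDed (x :: seen) xs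

def pvPair (f s : String) : List String := PySem.List.sorted [f, s] (fun x => x) false
def pvTrip (f x y : String) : List String := PySem.List.sorted [f, x, y] (fun z => z) false

theorem pvPair_fold (f s : String) :
    PySem.List.sorted [f, s] (fun x => x) false = pvPair f s := rfl

theorem pvTriples_cons (f x : String) (t : List String) :
    pvTriples f (x :: t) = t.map (pvTrip f x) ++ pvTriples f t := rfl

theorem pvDed_congr : ∀ (l : List String) {s₁ s₂ : List String},
    (∀ y, y ∈ s₁ ↔ y ∈ s₂) → pvDed s₁ l = pvDed s₂ l := by
  intro l
  induction l with
  | nil => intro s₁ s₂ h; rfl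
  | cons x xs ih =>
    intro s₁ s₂ h
    simp only [pvDed, h x]
    split
    · exact ih h
    · exact congrArg _ (ih (by intro y; simp [h y]))

theorem mem_pvDed : ∀ {l seen : List String} {x : String},
    x ∈ pvDed seen l ↔ x ∈ l ∧ x ∉ seen := by
  intro l
  induction l with
  | nil => intro seen x; simp [pvDed]
  | cons y ys ih =>
    intro seen x
    simp only [pvDed]
    split <;> rename_i hy <;>
      · rw [List.mem_cons]
        by_cases hxy : x = y <;> simp_all

theorem pvDed_nodup : ∀ (l seen : List String), (pvDed seen l).Nodup := by
  intro l
  induction l with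
  | nil => intro seen; simp [pvDed]
  | cons y ys ih =>
    intro seen
    simp only [pvDed]
    split
    · exact ih seen
    · refine List.nodup_cons.mpr ⟨fun hmem => ?_, ih _⟩
      exact (mem_pvDed.mp hmem).2 (List.mem_cons_self)

theorem pvDed_cons_of_head : ∀ {l seen ys : List String} {y : String},
    pvDed seen l = y :: ys → pvDed (y :: seen) l = ys := by
  intro l
  induction l with
  | nil => intro seen ys y h; exact absurd h (by simp [pvDed])
  | cons x xs ih =>
    intro seen ys y h
    by_cases hx : x ∈ seen
    · have h' : pvDed seen xs = y :: ys := by simpa [pvDed, hx] using h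
      have := ih h'
      rw [pvDed, if_pos (List.mem_cons_of_mem _ hx)]
      exact this
    · rw [pvDed, if_neg hx] at h
      obtain ⟨rfl, rfl⟩ : x = y ∧ pvDed (x :: seen) xs = ys := by
        constructor <;> [exact (List.cons.injEq .. ▸ h).1; exact (List.cons.injEq .. ▸ h).2]
      rw [pvDed, if_pos List.mem_cons_self]

theorem pvDed_drop : ∀ (p : List String) {seen l q : List String},
    pvDed seen l = p ++ q → pvDed (p ++ seen) l = q := by
  intro p
  induction p with
  | nil => intro seen l q h; simpa using h
  | cons y p' ih =>
    intro seen l q h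
    have h1 : pvDed (y :: seen) l = p' ++ q := pvDed_cons_of_head (by simpa using h)
    have h2 := ih h1
    rw [pvDed_congr l (s₁ := (y :: p') ++ seen) (s₂ := p' ++ (y :: seen)) (by intro z; simp; tauto)]
    exact h2

theorem pvDed_eq_nil : ∀ {seen l : List String},
    pvDed seen l = [] ↔ ∀ x ∈ l, x ∈ seen := by
  intro seen l
  rw [List.eq_nil_iff_forall_not_mem]
  constructor
  · intro h x hx
    by_contra hns
    exact h x (mem_pvDed.mpr ⟨hx, hns⟩)
  · intro h x hx
    obtain ⟨h1, h2⟩ := mem_pvDed.mp hx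
    exact h2 (h x h1)

theorem pvSortedPair (a b : String) :
    PySem.List.sorted [a, b] (fun x => x) false = if b < a then [b, a] else [a, b] := by
  simp [PySem.List.sorted_eq_foldl_insertBy, PySem.List.insertBy]

theorem pvSorted_of_perm {l l' : List String} (h : l.Perm l') :
    PySem.List.sorted l (fun x => x) false = PySem.List.sorted l' (fun x => x) false :=
  PySem.List.sorted_eq_sorted_of_perm l l' (fun x => x) (fun _ _ h => h) h

theorem mem_pvPair {f x y : String} : y ∈ pvPair f x ↔ y = f ∨ y = x := by
  simp [pvPair, PySem.List.mem_sorted]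

theorem pvPair_inj {f s u : String} (h : pvPair f s = pvPair f u) : s = u := by
  rw [pvPair, pvPair] at h
  have h1 : ([f, s] : List String).Perm [f, u] :=
    ((PySem.List.sorted_perm [f, s] (fun x => x) false).symm.trans
      (h ▸ PySem.List.sorted_perm [f, u] (fun x => x) false))
  simpa [List.singleton_perm_singleton] using h1.cons_inv

theorem pvFoldAppend : ∀ (gl : List (List String)) (acc : List String),
    gl.foldl (fun acc g => acc ++ g) acc = acc ++ gl.flatten := by
  intro gl
  induction gl with
  | nil => simp
  | cons g gs ih => intro acc; simp [ih]

theorem pvFlattenFold : ∀ (gl : List (List String)) (acc : List String),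
    gl.foldl (fun acc g => g.foldl (fun acc2 s => acc2 ++ [s]) acc) acc = acc ++ gl.flatten := by
  intro gl acc
  have hbody : (fun (acc : List String) (g : List String) => g.foldl (fun acc2 s => acc2 ++ [s]) acc)
      = fun acc g => acc ++ g := by
    funext acc g; exact PySem.List.foldl_append_singleton g acc
  rw [hbody, pvFoldAppend]

theorem pvCreateGroup_char (a : List (List String)) : ∀ SL : List String,
    pvCreateGroup a SL =
      (match pvDed a.flatten SL with
       | [] => a
       | f :: _ => a ++ [[f]]) := by
  intro SL
  induction SL with
  | nil => rfl
  | cons m rest ih =>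
    by_cases hm : m ∈ a.flatten
    · have hany : a.any (fun g => g.contains m) = true := by
        simp only [List.any_eq_true]
        obtain ⟨g, hg, hmg⟩ := List.mem_flatten.mp hm
        exact ⟨g, hg, by simpa using hmg⟩
      rw [pvCreateGroup, if_pos hany, ih, pvDed, if_pos hm]
    · have hany : ¬ (a.any (fun g => g.contains m) = true) := by
        simp only [List.any_eq_true]
        rintro ⟨g, hg, hmg⟩
        exact hm (List.mem_flatten.mpr ⟨g, hg, by simpa using hmg⟩)
      rw [pvCreateGroup, if_neg hany, pvDed, if_neg hm]

theorem pvTrip_build (f x s : String) :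
    PySem.List.sorted [(PySem.List.pyGet? (pvPair f x) 0).getD "",
      (PySem.List.pyGet? (pvPair f x) 1).getD "", s] (fun z => z) false = pvTrip f x s := by
  rw [pvPair, pvSortedPair]
  split
  · show PySem.List.sorted [x, f, s] (fun z => z) false = _
    exact pvSorted_of_perm (List.Perm.swap' f x (List.Perm.refl [s]))
  · rfl

theorem pvPerm_pair {x' s x u : String} (h : ([x', s] : List String).Perm [x, u]) :
    (x' = x ∧ s = u) ∨ (x' = u ∧ s = x) := by
  have hm : x' ∈ ([x, u] : List String) := h.mem_iff.mp (by simp)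
  rcases List.mem_pair.mp hm with rfl | rfl
  · exact Or.inl ⟨rfl, by simpa [List.singleton_perm_singleton] using h.cons_inv⟩
  · refine Or.inr ⟨rfl, ?_⟩
    have h2 : ([x', s] : List String).Perm [x', x] := h.trans (List.Perm.swap x' x [])
    simpa [List.singleton_perm_singleton] using h2.cons_inv

theorem pvTrip_eq_iff {f x' s x u : String} :
    pvTrip f x' s = pvTrip f x u ↔ ([x', s] : List String).Perm [x, u] := by
  constructor
  · intro h
    rw [pvTrip, pvTrip] at h
    have h1 : ([f, x', s] : List String).Perm [f, x, u] :=
      ((PySem.List.sorted_perm [f, x', s] (fun z => z) false).symm.trans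
        (h ▸ PySem.List.sorted_perm [f, x, u] (fun z => z) false))
    exact h1.cons_inv
  · intro h
    exact pvSorted_of_perm (h.cons f)

theorem pvTrip_inj {f x s u : String} (h : pvTrip f x s = pvTrip f x u) : s = u := by
  simpa [List.singleton_perm_singleton] using (pvTrip_eq_iff.mp h).cons_inv

-- the two_members loop with a growing dedup accumulator = map over a pvDed run
theorem pvTwoFold (seenG : List String) (f : String) :
    ∀ (SL src : List String),
    SL.foldl (fun acc s =>
      if seenG.contains s then acc
      else
        if acc.contains (PySem.List.sorted [f, s] (fun x => x) false) then acc
        else acc ++ [PySem.List.sorted [f, s] (fun x => x) false]) (src.map (pvPair f)) =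
    (src ++ pvDed (src ++ seenG) SL).map (pvPair f) := by
  intro SL
  induction SL with
  | nil => intro src; simp [pvDed]
  | cons s SL ih =>
    intro src
    rw [List.foldl_cons]
    by_cases hsG : s ∈ seenG
    · rw [if_pos (by simpa using hsG), ih, pvDed, if_pos (List.mem_append_right _ hsG)]
    · rw [if_neg (by simpa using hsG), pvPair_fold]
      by_cases hss : s ∈ src
      · rw [if_pos (by
          simp only [List.contains_iff_mem, List.mem_map]
          exact ⟨s, hss, rfl⟩), ih, pvDed, if_pos (List.mem_append_left _ hss)]
      · rw [if_neg (by
          simp only [List.contains_iff_mem, List.mem_map, not_exists]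
          rintro u ⟨hu, hequ⟩
          exact hss ((pvPair_inj hequ) ▸ hu)), pvDed, if_neg (by
          simp only [List.mem_append]
          tauto)]
        rw [show (src.map (pvPair f)) ++ [pvPair f s] = (src ++ [s]).map (pvPair f) by simp, ih]
        rw [pvDed_congr SL (s₁ := (src ++ [s]) ++ seenG) (s₂ := s :: (src ++ seenG))
          (by intro z; simp; tauto)]
        simp

-- the inner three_members loop for one pair (f, x)
theorem pvInnerFold (seenG : List String) (f x : String) (before : List String)
    (hf : f ∈ seenG) :
    ∀ (SL src : List String) (acc₀ : List (List String)),
    (∀ s, s ∉ seenG → s ≠ x → (pvTrip f x s ∈ acc₀ ↔ s ∈ before)) →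
    SL.foldl (fun acc s =>
      if seenG.contains s || (pvPair f x).contains s then acc
      else
        if acc.contains (pvTrip f x s) then acc
        else acc ++ [pvTrip f x s]) (acc₀ ++ src.map (pvTrip f x)) =
    acc₀ ++ (src ++ pvDed (src ++ x :: before ++ seenG) SL).map (pvTrip f x) := by
  intro SL
  induction SL with
  | nil => intro src acc₀ Hacc; simp [pvDed]
  | cons s SL ih =>
    intro src acc₀ Hacc
    rw [List.foldl_cons]
    by_cases hskip : s ∈ seenG ∨ s = x
    · have hcond : (seenG.contains s || (pvPair f x).contains s) = true := by
        rcases hskip with h | rfl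
        · simp [h]
        · simp [mem_pvPair]
      rw [if_pos hcond, ih _ _ Hacc, pvDed, if_pos (by
        rcases hskip with h | rfl
        · simp [h]
        · simp)]
    · push Not at hskip
      obtain ⟨hsG, hsx⟩ := hskip
      have hsf : s ≠ f := fun h => hsG (h ▸ hf)
      have hcond : ¬ ((seenG.contains s || (pvPair f x).contains s) = true) := by
        simp [mem_pvPair, hsG, hsx, hsf]
      rw [if_neg hcond]
      by_cases hmem : s ∈ before ∨ s ∈ src
      · rw [if_pos (by
          simp only [List.contains_iff_mem, List.mem_append, List.mem_map]
          rcases hmem with h | h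
          · exact Or.inl ((Hacc s hsG hsx).mpr h)
          · exact Or.inr ⟨s, h, rfl⟩), ih _ _ Hacc, pvDed, if_pos (by
          simp only [List.mem_append, List.mem_cons]
          tauto)]
      · push Not at hmem
        obtain ⟨hsb, hss⟩ := hmem
        rw [if_neg (by
          simp only [List.contains_iff_mem, List.mem_append, List.mem_map, not_or, not_exists]
          refine ⟨fun h => hsb ((Hacc s hsG hsx).mp h), ?_⟩
          rintro u ⟨hu, hequ⟩
          exact hss ((pvTrip_inj hequ) ▸ hu))]
        rw [show (acc₀ ++ src.map (pvTrip f x)) ++ [pvTrip f x s]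
            = acc₀ ++ (src ++ [s]).map (pvTrip f x) by simp, ih _ _ Hacc]
        rw [pvDed, if_neg (by
          simp only [List.mem_append, List.mem_cons]
          tauto)]
        rw [pvDed_congr SL (s₁ := (src ++ [s]) ++ x :: before ++ seenG)
          (s₂ := s :: (src ++ x :: before ++ seenG)) (by intro z; simp; tauto)]
        simp

-- the outer three_members loop over the pair list
theorem pvOuterFold (seenG : List String) (f : String) (SL : List String) (hf : f ∈ seenG) :
    ∀ (todo before : List String) (acc₀ : List (List String)),
    before ++ todo = pvDed seenG SL →
    (∀ x s, x ∈ todo → s ∉ seenG → s ≠ x → (pvTrip f x s ∈ acc₀ ↔ s ∈ before)) →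
    todo.foldl (fun acc3 x => SL.foldl (fun acc s =>
        if seenG.contains s || (pvPair f x).contains s then acc
        else
          if acc.contains (pvTrip f x s) then acc
          else acc ++ [pvTrip f x s]) acc3) acc₀
      = acc₀ ++ pvTriples f todo := by
  intro todo
  induction todo with
  | nil => intro before acc₀ hbt Hacc; simp [pvTriples]
  | cons x todo' ih =>
    intro before acc₀ hbt Hacc
    rw [List.foldl_cons]
    have hinner := pvInnerFold seenG f x before hf SL [] acc₀
      (fun s hs hnx => Hacc x s List.mem_cons_self hs hnx)
    simp only [List.map_nil, List.append_nil, List.nil_append] at hinner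
    rw [hinner]
    have hdrop : pvDed ((before ++ [x]) ++ seenG) SL = todo' :=
      pvDed_drop (before ++ [x]) (by rw [← hbt]; simp)
    have hded : pvDed (x :: before ++ seenG) SL = todo' := by
      rw [pvDed_congr SL (s₁ := x :: before ++ seenG) (s₂ := (before ++ [x]) ++ seenG)
        (by intro z; simp; tauto)]
      exact hdrop
    rw [hded]
    have hnodup : (before ++ x :: todo').Nodup := by rw [hbt]; exact pvDed_nodup SL seenG
    have hxt : x ∉ todo' := by
      have := (List.nodup_append.mp hnodup).2.1
      exact (List.nodup_cons.mp this).1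
    have ihres := ih (before ++ [x]) (acc₀ ++ todo'.map (pvTrip f x))
      (by rw [← hbt]; simp)
      (by
        intro x' s hx' hsG hsx'
        have hx'x : x' ≠ x := fun h => hxt (h ▸ hx')
        simp only [List.mem_append, List.mem_map]
        constructor
        · rintro (h | ⟨u, hu, hequ⟩)
          · simp [(Hacc x' s (List.mem_cons_of_mem _ hx') hsG hsx').mp h]
          · rcases pvPerm_pair (pvTrip_eq_iff.mp hequ) with ⟨h1, _⟩ | ⟨h1, _⟩
            · exact absurd h1.symm hx'x
            · exact Or.inr (by simp [h1.symm])
        · intro h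
          rcases h with h | h
          · exact Or.inl ((Hacc x' s (List.mem_cons_of_mem _ hx') hsG hsx').mpr h)
          · have hsx : s = x := by simpa using h
            refine Or.inr ⟨x', hx', ?_⟩
            rw [hsx]
            exact pvTrip_eq_iff.mpr (List.Perm.swap x' x []))
    rw [ihres, pvTriples_cons, List.append_assoc]

-- B's grouped set is flatten a, membership-wise
theorem pvGrouped_mem (a : List (List String)) (y : String) :
    (y ∈ a.foldl (fun s g => PySem.Set.update s g) PySem.Set.empty) ↔ y ∈ a.flatten := by
  suffices h : ∀ (a : List (List String)) (st : PySem.Set String),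
      (y ∈ a.foldl (fun s g => PySem.Set.update s g) st) ↔ y ∈ st ∨ y ∈ a.flatten by
    rw [h]
    simp [PySem.Set.empty]
  intro a
  induction a with
  | nil => intro st; simp
  | cons g gs ih =>
    intro st
    simp only [List.foldl_cons, ih, PySem.Set.mem_update, List.flatten_cons, List.mem_append]
    tauto

-- B's ungrouped loop is a pvDed run
theorem pvAltFold : ∀ (SL : List String) (st : PySem.Set String) (acc : List String),
    (SL.foldl (fun (p : PySem.Set String × List String) s =>
      if PySem.Set.contains p.1 s then p else (PySem.Set.add p.1 s, p.2 ++ [s])) (st, acc)).2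
    = acc ++ pvDed st SL := by
  intro SL
  induction SL with
  | nil => intro st acc; simp [pvDed]
  | cons s SL ih =>
    intro st acc
    by_cases hs : s ∈ st
    · rw [List.foldl_cons, if_pos (by simpa [PySem.Set.contains_iff] using hs)]
      rw [ih, pvDed, if_pos hs]
    · rw [List.foldl_cons, if_neg (by simpa [PySem.Set.contains_iff] using hs)]
      rw [ih, pvDed, if_neg hs]
      rw [pvDed_congr SL (s₁ := PySem.Set.add st s) (s₂ := s :: st)
        (by intro z; simp [PySem.Set.mem_add]; tauto)]
      simp

theorem pvSkipFold {seenG : List String} {SL : List String}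
    (h : ∀ s ∈ SL, s ∈ seenG) (G : List (List String) → String → List (List String)) :
    ∀ acc, SL.foldl (fun acc s => if seenG.contains s then acc else G acc s) acc = acc := by
  induction SL with
  | nil => intro acc; rfl
  | cons s SL ih =>
    intro acc
    rw [List.foldl_cons, if_pos (by simpa using h s (by simp))]
    exact ih (fun t ht => h t (List.mem_cons_of_mem _ ht)) acc

theorem pvFilterFold (a : List (List String)) :
    ∀ (l : List (List String)) (acc : List (List (List String))),
    l.foldl (fun acc g => if a.contains g then acc else acc ++ [a ++ [g]]) acc
      = acc ++ (l.filter (fun g => !a.contains g)).map (fun g => a ++ [g]) := by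
  intro l
  induction l with
  | nil => intro acc; simp
  | cons g l ih =>
    intro acc
    rw [List.foldl_cons]
    by_cases hg : a.contains g = true
    · rw [if_pos hg, ih, List.filter_cons_of_neg (by simpa using hg)]
    · rw [if_neg hg, ih, List.filter_cons_of_pos (by simpa using hg)]
      simp

theorem pvLastGet (xs : List (List String)) (y : List String) :
    (PySem.List.pyGet? (xs ++ [y]) (((xs ++ [y]).length : Int) - 1)).getD [] = y := by
  have hlen : (((xs ++ [y]).length : Int) - 1) = ((xs.length : Nat) : Int) := by simp
  rw [hlen, PySem.List.pyGet?_natCast]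
  simp

theorem pvTriples_mem_f (f : String) : ∀ (rest : List String) (t : List String),
    t ∈ pvTriples f rest → f ∈ t := by
  intro rest
  induction rest with
  | nil => intro t ht; simp [pvTriples] at ht
  | cons x tail ih =>
    intro t ht
    rw [pvTriples_cons, List.mem_append] at ht
    rcases ht with ht | ht
    · obtain ⟨y, _, rfl⟩ := List.mem_map.mp ht
      simp [pvTrip, PySem.List.mem_sorted]
    · exact ih t ht

theorem successors_alt_char (a : List (List String)) (SL : List String) :
    successors_alt a SL =
      (match pvDed a.flatten SL with
       | [] => []
       | f :: r => ([[f]] ++ r.map (pvPair f) ++ pvTriples f r).map (fun t => a ++ [t])) := by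
  simp only [successors_alt]
  rw [pvAltFold, List.nil_append, pvDed_congr SL (fun y => pvGrouped_mem a y)]
  rfl

theorem successors_char (a : List (List String)) (SL : List String) :
    successors a SL =
      (match pvDed a.flatten SL with
       | [] => []
       | f :: r => ([[f]] ++ r.map (pvPair f) ++ pvTriples f r).map (fun t => a ++ [t])) := by
  simp only [successors]
  rw [pvCreateGroup_char a SL]
  cases hU : pvDed a.flatten SL with
  | nil =>
    simp only [pvPTM, pvFlattenFold, List.nil_append]
    rw [pvSkipFold (seenG := a.flatten) (pvDed_eq_nil.mp hU)
      (fun acc s => if acc.contains (PySem.List.sorted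
        [(PySem.List.pyGet? ((PySem.List.pyGet? a ((a.length : Int) - 1)).getD []) 0).getD "", s]
        (fun x => x) false) = true then acc
        else acc ++ [PySem.List.sorted
        [(PySem.List.pyGet? ((PySem.List.pyGet? a ((a.length : Int) - 1)).getD []) 0).getD "", s]
        (fun x => x) false])]
    simp only [List.foldl_nil, List.append_nil]
    rw [pvFilterFold, List.filter_eq_nil_iff.mpr (by intro g hg; simp [hg]), List.map_nil,
      List.append_nil]
  | cons f r =>
    have hfm : f ∈ pvDed a.flatten SL := by rw [hU]; exact List.mem_cons_self
    have hfns : f ∉ a.flatten := (mem_pvDed.mp hfm).2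
    have hfseen : f ∈ a.flatten ++ [f] := by simp
    have hr : pvDed (a.flatten ++ [f]) SL = r := by
      rw [pvDed_congr SL (s₁ := a.flatten ++ [f]) (s₂ := f :: a.flatten)
        (by intro z; simp [or_comm])]
      exact pvDed_cons_of_head hU
    have hnotin : ∀ (l : List (List String)), (∀ t ∈ l, f ∈ t) →
        List.filter (fun g => !a.contains g) l = l := by
      intro l hl
      apply List.filter_eq_self.mpr
      intro g hg
      simp only [Bool.not_eq_eq_eq_not, Bool.not_true, List.contains_eq_mem, decide_eq_false_iff_not]
      intro hga
      exact hfns (List.mem_flatten.mpr ⟨g, hga, hl g hg⟩)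
    simp only [pvPTM, pvFlattenFold, List.nil_append, pvLastGet, List.flatten_append,
      List.flatten_cons, List.flatten_nil, List.append_nil]
    have hf0 : (PySem.List.pyGet? [f] (0 : Int)).getD "" = f := rfl
    simp only [hf0]
    have htwo := pvTwoFold (a.flatten ++ [f]) f SL []
    simp only [List.map_nil, List.nil_append] at htwo
    rw [htwo, hr]
    rw [List.foldl_map]
    simp only [pvTrip_build]
    rw [pvOuterFold (a.flatten ++ [f]) f SL hfseen r [] [] (by rw [hr]; rfl)
      (by intro x s _ _ _; simp)]
    rw [List.nil_append, pvFilterFold, List.nil_append]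
    simp only [List.filter_append]
    rw [List.filter_eq_nil_iff.mpr (by intro g hg; simp [hg])]
    rw [hnotin [[f]] (by intro t ht; simp at ht; simp [ht])]
    rw [hnotin (r.map (pvPair f)) (by
      intro t ht
      obtain ⟨x, _, rfl⟩ := List.mem_map.mp ht
      exact mem_pvPair.mpr (Or.inl rfl))]
    rw [hnotin (pvTriples f r) (pvTriples_mem_f f r)]
    simp

-- ===== VERDICT (by name: the statement is the Claim_ definition above) =====
theorem successors_spec : Claim_equal_successors := by
  intro a SL _ _
  unfold Spec_successors
  rw [successors_char, successors_alt_char]
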